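-- pv_equiv track=rewrite | github.com/nickaigi/automatic-dollop | arcade_solutions/the_core/crossword_formation.py | crossword_formation
-- ===== SOURCE A (Python) =====
-- def crossword_formation(words):
--     from itertools import permutations as perms
--     from collections import defaultdict as ddic
--     ans = 0
--     for p in perms(words):
--         M = ddic(int)
--         a, b, c, d = p
--         for i in range(2, min(len(a), len(b))):
--             for p in range(len(a) - i):
--                 for q in range(len(b) - i):
--                     M[a[p], a[p+i], b[q], b[q+i]] += 1
--         for i in range(2, min(len(c), len(d))):
--             for p in range(len(c) - i):
--                 for q in range(len(d) - i):
--                     ans += M[c[p], d[q], c[p+i], d[q+i]]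
--     return ans
-- ===== SOURCE B (Python) =====
-- def crossword_formation(words):
--     # Brute-force: for each permutation, directly count matching (horizontal, vertical)
--     # slot pairs instead of building an intermediate hash table of pair keys.
--     from itertools import permutations
--     ans = 0
--     for a, b, c, d in permutations(words):
--         for j in range(2, min(len(c), len(d))):
--             for r in range(len(c) - j):
--                 for s in range(len(d) - j):
--                     for i in range(2, min(len(a), len(b))):
--                         for p in range(len(a) - i):
--                             for q in range(len(b) - i):
--                                 if (a[p] == c[r] and a[p + i] == d[s]
--                                         and b[q] == c[r + j] and b[q + i] == d[s + j]):
--                                     ans += 1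
--     return ans
-- ===== Notes on version B (the rewrite author's own statement) =====
-- stated objective: alternative
-- what changed: Replaces A's per-permutation build-then-lookup hash table of (char,char,char,char) slot-pair keys with a direct brute-force nested-loop count of matching slot pairs, with no intermediate dict.
import Mathlib
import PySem

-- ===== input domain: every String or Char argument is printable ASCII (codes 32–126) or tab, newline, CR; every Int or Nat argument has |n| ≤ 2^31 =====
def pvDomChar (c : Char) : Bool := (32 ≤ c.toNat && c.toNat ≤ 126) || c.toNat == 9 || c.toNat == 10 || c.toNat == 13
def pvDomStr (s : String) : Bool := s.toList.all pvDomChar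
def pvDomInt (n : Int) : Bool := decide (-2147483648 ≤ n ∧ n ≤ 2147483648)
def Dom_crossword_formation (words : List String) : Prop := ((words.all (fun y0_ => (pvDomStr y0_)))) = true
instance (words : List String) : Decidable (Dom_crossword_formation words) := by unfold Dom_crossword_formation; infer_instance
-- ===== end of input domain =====

-- B replaces A's build-then-lookup hash table of slot-pair keys by a direct brute-force
-- count of matching slot pairs (no intermediate dict): objective 'alternative'.

-- ===== PORT A =====
-- all indices fed to pyGetD are in range, so the default ' ' is never used;
-- the defaultdict lookup M[k] also inserts k with 0, which never changes any looked-up value,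
-- so it is ported as getD.
def cfBuild (a b : List Char) : PySem.Dict (Char × Char × Char × Char) Int :=
  (PySem.List.pyRange 2 (min (a.length : Int) (b.length : Int)) 1).foldl (fun M i =>
    (PySem.List.pyRange 0 ((a.length : Int) - i) 1).foldl (fun M p =>
      (PySem.List.pyRange 0 ((b.length : Int) - i) 1).foldl (fun M q =>
        M.modify (PySem.List.pyGetD a p ' ', PySem.List.pyGetD a (p + i) ' ',
                  PySem.List.pyGetD b q ' ', PySem.List.pyGetD b (q + i) ' ') 0 (· + 1)) M) M)
    PySem.Dict.empty

def cfCountA (a b c d : List Char) : Int :=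
  (PySem.List.pyRange 2 (min (c.length : Int) (d.length : Int)) 1).foldl (fun ans i =>
    (PySem.List.pyRange 0 ((c.length : Int) - i) 1).foldl (fun ans p =>
      (PySem.List.pyRange 0 ((d.length : Int) - i) 1).foldl (fun ans q =>
        ans + (cfBuild a b).getD (PySem.List.pyGetD c p ' ', PySem.List.pyGetD d q ' ',
                                  PySem.List.pyGetD c (p + i) ' ', PySem.List.pyGetD d (q + i) ' ') 0)
        ans) ans) 0

def cfStepA (ans : Int) (t : List String) : Int :=
  match t with
  | [a, b, c, d] => ans + cfCountA a.toList b.toList c.toList d.toList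
  | _ => ans

def crossword_formation (words : List String) : Int :=
  (PySem.List.permutations words words.length).foldl cfStepA 0

-- ===== PORT B =====
def cfCountB (a b c d : List Char) : Int :=
  (PySem.List.pyRange 2 (min (c.length : Int) (d.length : Int)) 1).foldl (fun ans j =>
    (PySem.List.pyRange 0 ((c.length : Int) - j) 1).foldl (fun ans r =>
      (PySem.List.pyRange 0 ((d.length : Int) - j) 1).foldl (fun ans s =>
        (PySem.List.pyRange 2 (min (a.length : Int) (b.length : Int)) 1).foldl (fun ans i =>
          (PySem.List.pyRange 0 ((a.length : Int) - i) 1).foldl (fun ans p =>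
            (PySem.List.pyRange 0 ((b.length : Int) - i) 1).foldl (fun ans q =>
              if PySem.List.pyGetD a p ' ' = PySem.List.pyGetD c r ' ' ∧
                 PySem.List.pyGetD a (p + i) ' ' = PySem.List.pyGetD d s ' ' ∧
                 PySem.List.pyGetD b q ' ' = PySem.List.pyGetD c (r + j) ' ' ∧
                 PySem.List.pyGetD b (q + i) ' ' = PySem.List.pyGetD d (s + j) ' '
              then ans + 1 else ans) ans) ans) ans) ans) ans) 0

def cfStepB (ans : Int) (t : List String) : Int :=
  match t with
  | [a, b, c, d] => ans + cfCountB a.toList b.toList c.toList d.toList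
  | _ => ans

def crossword_formation_alt (words : List String) : Int :=
  (PySem.List.permutations words words.length).foldl cfStepB 0

-- ===== PRECONDITION & SPEC =====
-- Python A unpacks each permutation into exactly four words, so it raises ValueError
-- unless the list has exactly 4 elements.
def Pre_crossword_formation (words : List String) : Prop := words.length = 4
instance (words : List String) : Decidable (Pre_crossword_formation words) := by
  unfold Pre_crossword_formation; infer_instance
def pvWitness_crossword_formation : List String := ["baa", "aab", "aa", "aaab"]

def Spec_crossword_formation (words : List String) (out : Int) : Prop := out = crossword_formation_alt words
instance (words : List String) (out : Int) : Decidable (Spec_crossword_formation words out) := by unfold Spec_crossword_formation; infer_instance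

-- ===== CLAIM (what is proved, stated in full; the proofs are below) =====
def Claim_equal_crossword_formation : Prop := ∀ (words : List String), Dom_crossword_formation words → Pre_crossword_formation words → Spec_crossword_formation words (crossword_formation words)

-- ===== LEMMAS AND PROOFS =====

-- the multiset of keys A's first double loop feeds into the dict, as one flat list
def cfKeys1 (a b : List Char) : List (Char × Char × Char × Char) :=
  (PySem.List.pyRange 2 (min (a.length : Int) (b.length : Int)) 1).flatMap (fun i =>
    (PySem.List.pyRange 0 ((a.length : Int) - i) 1).flatMap (fun p =>
      (PySem.List.pyRange 0 ((b.length : Int) - i) 1).map (fun q =>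
        (PySem.List.pyGetD a p ' ', PySem.List.pyGetD a (p + i) ' ',
         PySem.List.pyGetD b q ' ', PySem.List.pyGetD b (q + i) ' '))))

theorem cfBuild_eq_foldl (a b : List Char) :
    cfBuild a b = (cfKeys1 a b).foldl (fun d k => d.modify k 0 (· + 1)) PySem.Dict.empty := by
  simp only [cfKeys1, List.foldl_flatMap, List.foldl_map, cfBuild]

theorem cfBuild_getD (a b : List Char) (k : Char × Char × Char × Char) :
    (cfBuild a b).getD k 0 = ((cfKeys1 a b).count k : Int) := by
  rw [cfBuild_eq_foldl]
  simp [PySem.Dict.getD_foldl_modify_add_one, PySem.Dict.getD_empty]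

theorem cfCount_eq (a b c d : List Char) : cfCountA a b c d = cfCountB a b c d := by
  simp only [cfCountA, cfCountB, cfBuild_getD, PySem.List.foldl_ite_add_one,
    PySem.List.foldl_add, zero_add, cfKeys1, List.count_eq_countP, List.countP_flatMap,
    List.countP_map, Function.comp_def]
  simp only [Nat.cast_list_sum, List.map_map, Function.comp_def, Bool.beq_eq_decide_eq, Prod.mk.injEq]

-- ===== VERDICT (by name: the statement is the Claim_ definition above) =====
theorem crossword_formation_spec : Claim_equal_crossword_formation := by
  intro words _ _
  unfold Spec_crossword_formation crossword_formation crossword_formation_alt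
  apply PySem.List.foldl_congr_mem
  intro acc t _
  unfold cfStepA cfStepB
  match t with
  | [] => rfl
  | [_] => rfl
  | [_, _] => rfl
  | [_, _, _] => rfl
  | _ :: _ :: _ :: _ :: _ :: _ => rfl
  | [a, b, c, d] => simp only [cfCount_eq]
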